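-- pv_equiv track=rewrite | github.com/grapheneaffiliate/h4-polytopic-attention | solve_batch20.py | solve_cdecee7f
-- ===== SOURCE A (Python) =====
-- def solve_cdecee7f(grid):
--     h, w = len(grid), len(grid[0])
--     vals = []
--     for r in range(h):
--         for c in range(w):
--             if grid[r][c] != 0:
--                 vals.append((c, r, grid[r][c]))
--     vals.sort()
--     values = [v[2] for v in vals]
--
--     out = [[0]*3 for _ in range(3)]
--     idx = 0
--     for r in range(3):
--         cols = range(3) if r % 2 == 0 else range(2, -1, -1)
--         for c in cols:
--             if idx < len(values):
--                 out[r][c] = values[idx]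
--                 idx += 1
--     return out
-- ===== SOURCE B (Python) =====
-- def solve_cdecee7f(grid):
--     h, w = len(grid), len(grid[0])
--     # column-major scan (c outer, r inner) yields the values already in the
--     # (c, r) order A obtains by tagging and sorting, since positions are unique
--     values = [grid[r][c] for c in range(w) for r in range(h) if grid[r][c] != 0]
--     v = (values + [0] * 9)[:9]
--     # boustrophedon 3x3: row 1 is written right-to-left
--     return [v[0:3], v[3:6][::-1], v[6:9]]
-- ===== Notes on version B (the rewrite author's own statement) =====
-- stated objective: faster
-- what changed: B drops A's tag-with-(c,r)-and-sort step entirely: a column-major scan already yields the values in A's sorted (c,r) order, and the 3x3 boustrophedon is built by padding the value list to 9 and slicing (middle slice reversed) instead of A's index-mutation fill loop.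
import Mathlib
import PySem

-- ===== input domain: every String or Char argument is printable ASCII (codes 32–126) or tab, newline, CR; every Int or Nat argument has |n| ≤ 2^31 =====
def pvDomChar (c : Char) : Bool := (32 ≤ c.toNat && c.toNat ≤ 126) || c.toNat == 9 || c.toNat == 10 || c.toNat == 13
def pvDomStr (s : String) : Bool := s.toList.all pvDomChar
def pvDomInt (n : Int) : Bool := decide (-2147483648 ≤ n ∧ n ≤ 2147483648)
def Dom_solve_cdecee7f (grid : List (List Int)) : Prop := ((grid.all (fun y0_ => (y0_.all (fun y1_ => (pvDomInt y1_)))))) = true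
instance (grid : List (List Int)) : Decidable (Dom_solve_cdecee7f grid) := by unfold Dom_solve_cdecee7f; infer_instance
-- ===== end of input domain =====

-- B replaces A's tag-and-sort collection by a column-major scan (the (c, r) sort
-- order is exactly column-major traversal, positions being unique) and builds the
-- 3x3 boustrophedon by padding/slicing instead of an index-mutation loop.

-- grid[r][c]: exact under Pre_ (r < h and c < w ≤ length of row r), shared notation of both sources
def gcell (grid : List (List Int)) (r c : Nat) : Int := (grid.getD r []).getD c 0

-- ===== PORT A =====
def solve_cdecee7f (grid : List (List Int)) : List (List Int) :=
  let h := grid.length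
  let w := (grid.headD []).length   -- len(grid[0]); exact since Pre_ requires grid ≠ []
  let vals : List (Nat × Nat × Int) :=
    (List.range h).foldl (fun acc r =>
      (List.range w).foldl (fun acc c =>
        if gcell grid r c ≠ 0 then acc ++ [(c, r, gcell grid r c)] else acc) acc) []
  -- vals.sort(): lexicographic on (c, r, value); the value never decides it, the (c, r) positions being pairwise distinct
  let vals := PySem.List.sorted2 vals (fun t => t.1) (fun t => t.2.1)
  let values := vals.map (fun t => t.2.2)
  let out0 : List (List Int) := (List.range 3).map (fun _ => List.replicate 3 0)
  let fin := (List.range 3).foldl (fun (st : List (List Int) × Nat) r =>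
      let cols : List Nat := if r % 2 == 0 then [0, 1, 2] else [2, 1, 0]  -- range(3) / range(2,-1,-1)
      cols.foldl (fun st c =>
        if st.2 < values.length then
          (st.1.set r ((st.1.getD r []).set c (values.getD st.2 0)), st.2 + 1)
        else st) st) (out0, 0)
  fin.1

-- ===== PORT B =====
def solve_cdecee7f_alt (grid : List (List Int)) : List (List Int) :=
  let h := grid.length
  let w := (grid.headD []).length   -- len(grid[0]); exact since Pre_ requires grid ≠ []
  let values : List Int :=
    (List.range w).foldl (fun acc c =>
      (List.range h).foldl (fun acc r =>
        if gcell grid r c ≠ 0 then acc ++ [gcell grid r c] else acc) acc) []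
  let v := (values ++ List.replicate 9 0).take 9   -- (values + [0]*9)[:9]; exact, list length ≥ 9
  [v.take 3, ((v.drop 3).take 3).reverse, (v.drop 6).take 3]

-- ===== PRECONDITION & SPEC =====
-- Pre_ excludes exactly the inputs where the Python A raises IndexError:
-- the empty grid (grid[0]) and ragged grids with a row shorter than the first row.
def Pre_solve_cdecee7f (grid : List (List Int)) : Prop :=
  grid ≠ [] ∧ ∀ row ∈ grid, (grid.headD []).length ≤ row.length
instance (grid : List (List Int)) : Decidable (Pre_solve_cdecee7f grid) := by
  unfold Pre_solve_cdecee7f; infer_instance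

def pvWitness_solve_cdecee7f : List (List Int) := [[1, 0], [0, 2]]

def Spec_solve_cdecee7f (grid : List (List Int)) (out : List (List Int)) : Prop := out = solve_cdecee7f_alt grid
instance (grid : List (List Int)) (out : List (List Int)) : Decidable (Spec_solve_cdecee7f grid out) := by unfold Spec_solve_cdecee7f; infer_instance

-- ===== CLAIM (what is proved, stated in full; the proofs are below) =====
def Claim_equal_solve_cdecee7f : Prop := ∀ (grid : List (List Int)), Dom_solve_cdecee7f grid → Pre_solve_cdecee7f grid → Spec_solve_cdecee7f grid (solve_cdecee7f grid)

-- ===== LEMMAS AND PROOFS =====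

-- the tagged triple A pushes at position (r, c), as an Option
def tri (grid : List (List Int)) (r c : Nat) : Option (Nat × Nat × Int) :=
  if gcell grid r c ≠ 0 then some (c, r, gcell grid r c) else none

-- A's raw tag-collection loop (row-major), named so the port is rfl-equal to it
def rowT (grid : List (List Int)) : List (Nat × Nat × Int) :=
  (List.range grid.length).foldl (fun acc r =>
    (List.range ((grid.headD []).length)).foldl (fun acc c =>
      if gcell grid r c ≠ 0 then acc ++ [(c, r, gcell grid r c)] else acc) acc) []

-- column-major list of tagged triples: B's traversal order
def colT (grid : List (List Int)) (h w : Nat) : List (Nat × Nat × Int) :=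
  (List.range w).flatMap (fun c => (List.range h).filterMap (fun r => tri grid r c))

-- B's value-collection loop (column-major), named so the port is rfl-equal to it
def valsB (grid : List (List Int)) : List Int :=
  (List.range ((grid.headD []).length)).foldl (fun acc c =>
    (List.range grid.length).foldl (fun acc r =>
      if gcell grid r c ≠ 0 then acc ++ [gcell grid r c] else acc) acc) []

-- A's boustrophedon fill, named so the port is rfl-equal to it
def fillA (vs : List Int) : List (List Int) :=
  ((List.range 3).foldl (fun (st : List (List Int) × Nat) r =>
      let cols : List Nat := if r % 2 == 0 then [0, 1, 2] else [2, 1, 0]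
      cols.foldl (fun st c =>
        if st.2 < vs.length then
          (st.1.set r ((st.1.getD r []).set c (vs.getD st.2 0)), st.2 + 1)
        else st) st) ((List.range 3).map (fun _ => List.replicate 3 0), 0)).1

-- B's pad-and-slice fill, named so the port is rfl-equal to it
def fillB (vs : List Int) : List (List Int) :=
  let v := (vs ++ List.replicate 9 0).take 9
  [v.take 3, ((v.drop 3).take 3).reverse, (v.drop 6).take 3]

lemma foldl_if_push {β γ : Type} (p : β → Prop) [DecidablePred p] (f : β → γ) :
    ∀ (l : List β) (acc : List γ),
      l.foldl (fun a x => if p x then a ++ [f x] else a) acc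
        = acc ++ l.filterMap (fun x => if p x then some (f x) else none) := by
  intro l
  induction l with
  | nil => simp
  | cons x t ih => intro acc; by_cases hx : p x <;> simp [hx, ih]

lemma foldl_blocks {β γ : Type} (F : List γ → β → List γ) (blk : β → List γ)
    (hF : ∀ acc b, F acc b = acc ++ blk b) :
    ∀ (l : List β) (acc : List γ), l.foldl F acc = acc ++ l.flatMap blk := by
  intro l
  induction l with
  | nil => simp
  | cons x t ih => intro acc; simp [hF, ih]

lemma filterMap_eq_flatMap_toList {β γ : Type} (f : β → Option γ) (l : List β) :
    l.filterMap f = l.flatMap (fun x => (f x).toList) := by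
  induction l with
  | nil => rfl
  | cons x t ih =>
    cases hx : f x <;> simp [hx, ih]

lemma flatMap_flatMap_perm {β γ δ : Type} (l1 : List β) (l2 : List γ) (f : β → γ → List δ) :
    (l1.flatMap fun a => l2.flatMap (f a)).Perm (l2.flatMap fun b => l1.flatMap (fun a => f a b)) := by
  rw [← Multiset.coe_eq_coe, ← Multiset.coe_bind, ← Multiset.coe_bind]
  simp only [← Multiset.coe_bind]
  exact Multiset.bind_bind _ _

lemma tri_eq_some {grid : List (List Int)} {r c : Nat} {b : Nat × Nat × Int}
    (hb : tri grid r c = some b) : b = (c, r, gcell grid r c) := by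
  unfold tri at hb
  split_ifs at hb with h
  exact (Option.some.inj hb).symm

lemma sorted2_eq_sorted_toLex {α : Type} (xs : List α) (k1 k2 : α → Nat) :
    PySem.List.sorted2 xs k1 k2 = PySem.List.sorted xs (fun x => toLex (k1 x, k2 x)) := by
  have hfun : (fun (a b : α) => decide (k1 a < k1 b) || (!decide (k1 b < k1 a) && decide (k2 a < k2 b)))
      = (fun a b => decide (toLex (k1 a, k2 a) < toLex (k1 b, k2 b))) := by
    funext a b
    by_cases h1 : k1 a < k1 b <;> by_cases h2 : k1 b < k1 a <;> by_cases h3 : k2 a < k2 b <;>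
      simp [h1, h2, h3, Prod.Lex.lt_iff] <;> omega
  calc PySem.List.sorted2 xs k1 k2
      = List.foldl (fun acc x => PySem.List.insertBy
          (fun a b => decide (k1 a < k1 b) || (!decide (k1 b < k1 a) && decide (k2 a < k2 b))) x acc) [] xs := rfl
    _ = List.foldl (fun acc x => PySem.List.insertBy
          (fun a b => decide (toLex (k1 a, k2 a) < toLex (k1 b, k2 b))) x acc) [] xs := by rw [hfun]
    _ = PySem.List.sorted xs (fun x => toLex (k1 x, k2 x)) :=
        (PySem.List.sorted_eq_foldl_insertBy xs _).symm

-- A's sorted tagged list is B's column-major traversal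
lemma sorted_rowT_eq_colT (grid : List (List Int)) :
    PySem.List.sorted2 (rowT grid) (fun t => t.1) (fun t => t.2.1)
      = colT grid grid.length ((grid.headD []).length) := by
  have hrow : rowT grid = (List.range grid.length).flatMap
      (fun r => (List.range ((grid.headD []).length)).filterMap (fun c => tri grid r c)) := by
    unfold rowT
    rw [foldl_blocks _ (fun r => (List.range ((grid.headD []).length)).filterMap (fun c => tri grid r c))
          (by intro acc r
              rw [foldl_if_push (fun c => gcell grid r c ≠ 0) (fun c => (c, r, gcell grid r c))]
              rfl)]
    simp
  rw [hrow, sorted2_eq_sorted_toLex]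
  apply PySem.List.sorted_eq_of_perm_of_pairwise_lt
  · unfold colT
    have := flatMap_flatMap_perm (List.range grid.length) (List.range ((grid.headD []).length))
      (fun r c => (tri grid r c).toList)
    simp only [← filterMap_eq_flatMap_toList] at this
    exact this.symm
  · unfold colT
    rw [List.pairwise_flatMap]
    constructor
    · intro c _
      rw [List.pairwise_filterMap]
      refine List.pairwise_lt_range.imp ?_
      intro r r' hrr' b hb b' hb'
      rw [tri_eq_some hb, tri_eq_some hb', Prod.Lex.lt_iff]
      right
      exact ⟨rfl, hrr'⟩
    · refine List.pairwise_lt_range.imp ?_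
      intro c c' hcc' x hx y hy
      rw [List.mem_filterMap] at hx hy
      obtain ⟨r, _, hr⟩ := hx
      obtain ⟨r', _, hr'⟩ := hy
      rw [tri_eq_some hr, tri_eq_some hr', Prod.Lex.lt_iff]
      left
      exact hcc'

-- projecting the value out of the column-major triples gives B's value list
lemma colT_map_third (grid : List (List Int)) :
    (colT grid grid.length ((grid.headD []).length)).map (fun t => t.2.2) = valsB grid := by
  have hB : valsB grid = (List.range ((grid.headD []).length)).flatMap
      (fun c => (List.range grid.length).filterMap
        (fun r => if gcell grid r c ≠ 0 then some (gcell grid r c) else none)) := by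
    unfold valsB
    rw [foldl_blocks _ (fun c => (List.range grid.length).filterMap
          (fun r => if gcell grid r c ≠ 0 then some (gcell grid r c) else none))
          (by intro acc c
              rw [foldl_if_push (fun r => gcell grid r c ≠ 0) (fun r => gcell grid r c)])]
    simp
  rw [hB]
  unfold colT
  rw [List.map_flatMap]
  refine List.flatMap_congr ?_
  intro c _
  rw [List.map_filterMap]
  refine List.filterMap_congr ?_
  intro r _
  unfold tri
  split_ifs <;> rfl

-- the two fills agree for every value list
set_option maxHeartbeats 1600000 in
lemma fill_eq (vs : List Int) : fillA vs = fillB vs := by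
  rcases vs with _ | ⟨a, _ | ⟨b, _ | ⟨c, _ | ⟨d, _ | ⟨e, _ | ⟨f, _ | ⟨g, _ | ⟨i, _ | ⟨j, rest⟩⟩⟩⟩⟩⟩⟩⟩⟩ <;> rfl

-- ===== VERDICT (by name: the statement is the Claim_ definition above) =====
theorem solve_cdecee7f_spec : Claim_equal_solve_cdecee7f := by
  intro grid _ _
  unfold Spec_solve_cdecee7f
  have hA : solve_cdecee7f grid
      = fillA ((PySem.List.sorted2 (rowT grid) (fun t => t.1) (fun t => t.2.1)).map (fun t => t.2.2)) := rfl
  have hB : solve_cdecee7f_alt grid = fillB (valsB grid) := rfl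
  rw [hA, hB, sorted_rowT_eq_colT, colT_map_third]
  exact fill_eq _
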